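-- pv_equiv track=rewrite | github.com/DonghoonPark12/Programmers_Interview_Kit | Hash/위장.py | solution
-- ===== SOURCE A (Python) =====
-- def solution(clothes):
--     answer = 1
--     dic = {}
--     num = []
--     for name, cate in clothes:
--         if cate in dic:
--             dic[cate].append(name)
--         else:
--             dic[cate] = [name] #dictionary 원소를 리스트로 만든다.
--
--     for key in dic.keys():
--         num.append(len(dic[key])) #각 values 값을 리스트로
--     cnt = 0
--     for i in dic.values():
--         answer *= len(i) # 2 * 1 = 2
--         cnt += len(i)
--     answer += cnt
--
--     return answer
-- ===== SOURCE B (Python) =====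
-- def solution(clothes):
--     # Sort just the category names, then a run-length scan over the sorted list:
--     # product of run lengths + total count.
--     cats = sorted(cate for _name, cate in clothes)
--     n = len(cats)
--     product = 1
--     i = 0
--     while i < n:
--         j = i + 1
--         while j < n and cats[j] == cats[i]:
--             j += 1
--         product *= j - i
--         i = j
--     return product + n
-- ===== Notes on version B (the rewrite author's own statement) =====
-- stated objective: alternative
-- what changed: Replaces the dict-of-name-lists grouping (plus the unused num list and a separate values pass) by sort-by-category and a single run-length scan: product of run lengths plus len(clothes).
import Mathlib
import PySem

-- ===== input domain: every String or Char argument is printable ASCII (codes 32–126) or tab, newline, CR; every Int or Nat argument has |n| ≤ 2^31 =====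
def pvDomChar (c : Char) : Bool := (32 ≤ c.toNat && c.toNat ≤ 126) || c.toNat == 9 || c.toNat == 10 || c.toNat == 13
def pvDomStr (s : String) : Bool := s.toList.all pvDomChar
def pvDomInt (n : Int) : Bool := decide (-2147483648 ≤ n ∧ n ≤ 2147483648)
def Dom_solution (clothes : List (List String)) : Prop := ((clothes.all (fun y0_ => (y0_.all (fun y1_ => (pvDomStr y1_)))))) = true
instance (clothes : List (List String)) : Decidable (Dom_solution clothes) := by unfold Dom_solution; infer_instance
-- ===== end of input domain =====

-- B replaces A's dict-of-name-lists grouping by sort-by-category + a run-length scan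
-- (product of run lengths + total length): an alternative algorithm of similar cost.


-- ===== PORT A =====
-- 'for name, cate in clothes' unpacks a 2-element item; under Pre_ (length 2)
-- name = c[0] and cate = c[1], transcribed with getD (exact there).
def solution (clothes : List (List String)) : Int :=
  let dic := clothes.foldl (fun (d : PySem.Dict String (List String)) c =>
      let name := c.getD 0 ""
      let cate := c.getD 1 ""
      if d.contains cate then d.modify cate [] (· ++ [name])
      else d.insert cate [name]) PySem.Dict.empty
  let _num := dic.keys.foldl (fun (num : List Int) key =>
      num ++ [PySem.List.len ((dic.get? key).getD [])]) []
  let p := dic.values.foldl (fun (ac : Int × Int) i =>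
      (ac.1 * PySem.List.len i, ac.2 + PySem.List.len i)) (1, 0)
  p.1 + p.2

-- ===== PORT B =====
-- 'sorted(cate for _name, cate in clothes)' — the generator unpacks a 2-element
-- item; under Pre_ (length 2) cate = c[1], transcribed with getD (exact there);
-- sorted without a key is sorted with the identity key.
-- The inner 'while j < n and cats[j] == cats[i]' run scan is transcribed as
-- takeWhile/dropWhile on the suffix; the outer while-loop restarts at j = the
-- end of the run, i.e. recursion on the remaining suffix.
def runProd (s : List String) : Int :=
  match s with
  | [] => 1
  | c :: rest =>
      let t := rest.takeWhile (fun x => x == c)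
      ((t.length : Int) + 1) * runProd (rest.dropWhile (fun x => x == c))
termination_by s.length
decreasing_by
  simp only [List.length_cons]
  exact Nat.lt_succ_of_le (List.length_dropWhile_le _ _)

def solution_alt (clothes : List (List String)) : Int :=
  let cats := PySem.List.sorted (clothes.map (fun c => c.getD 1 "")) (fun x => x) false
  runProd cats + PySem.List.len cats

-- ===== PRECONDITION & SPEC =====
-- Pre_ excludes exactly the inputs where the Python A raises: an item whose
-- length is not 2 makes 'for name, cate in clothes' raise ValueError.
def Pre_solution (clothes : List (List String)) : Prop :=
  ∀ c ∈ clothes, c.length = 2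
instance (clothes : List (List String)) : Decidable (Pre_solution clothes) := by
  unfold Pre_solution; infer_instance

def pvWitness_solution : List (List String) :=
  [["a", "shirt"], ["b", "shirt"], ["c", "hat"]]

def Spec_solution (clothes : List (List String)) (out : Int) : Prop := out = solution_alt clothes
instance (clothes : List (List String)) (out : Int) : Decidable (Spec_solution clothes out) := by unfold Spec_solution; infer_instance

-- ===== CLAIM (what is proved, stated in full; the proofs are below) =====
def Claim_equal_solution : Prop := ∀ (clothes : List (List String)), Dom_solution clothes → Pre_solution clothes → Spec_solution clothes (solution clothes)

-- ===== LEMMAS AND PROOFS =====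

-- the category key of an item, as both ports read it
def kf (c : List String) : String := c.getD 1 ""

-- count of category k among the items, as Int
def cnt (l : List (List String)) (k : String) : Int :=
  (l.countP (fun c => kf c == k) : Int)

-- count of k in a list of category names, as Int
def cntS (s : List String) (k : String) : Int :=
  (s.countP (fun x => x == k) : Int)

-- A's dict-insert branch IS a 'modify' when the key is absent
theorem modify_not_contains (d : PySem.Dict String (List String)) (k : String)
    (v : List String → List String) (h : d.contains k = false) :
    d.modify k [] v = d.insert k (v []) := by
  have hg : d.getD k [] = [] := PySem.Dict.getD_of_not_contains d [] h
  simp [PySem.Dict.modify, PySem.Dict.insert, h, hg]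

-- product accumulator of A's values loop
theorem foldl_mul_len (l : List (List String)) (a : Int) :
    l.foldl (fun ac i => ac * PySem.List.len i) a
      = a * (l.map (fun i => (i.length : Int))).prod := by
  induction l generalizing a with
  | nil => simp
  | cons c t ih =>
    rw [List.foldl_cons, ih, List.map_cons, List.prod_cons, PySem.List.len_eq]
    ring

-- sum of the 0/1 indicator over a nodup key list containing x
theorem ind_sum (K : List String) (x : String) (hnd : K.Nodup) (hx : x ∈ K) :
    (K.map (fun k => if x = k then (1 : Int) else 0)).sum = 1 := by
  induction K with
  | nil => cases hx
  | cons k K' ih =>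
    rcases List.nodup_cons.mp hnd with ⟨hk, hnd'⟩
    by_cases hxk : x = k
    · subst hxk
      have hz : ((K'.map (fun k => if x = k then (1 : Int) else 0))).sum = 0 := by
        apply List.sum_eq_zero
        intro y hy
        rcases List.mem_map.mp hy with ⟨k', hk', rfl⟩
        have hne : x ≠ k' := fun h => hk (h ▸ hk')
        simp [hne]
      rw [List.map_cons, List.sum_cons, hz]
      simp
    · rcases List.mem_cons.mp hx with rfl | hx'
      · exact absurd rfl hxk
      · rw [List.map_cons, List.sum_cons, ih hnd' hx']
        simp [hxk]

-- the counts over any covering nodup key list sum to the length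
theorem sum_cnt (l : List (List String)) (K : List String) (hnd : K.Nodup)
    (hcov : ∀ c ∈ l, kf c ∈ K) :
    (K.map (cnt l)).sum = (l.length : Int) := by
  induction l with
  | nil =>
    have h0 : ∀ k ∈ K, cnt [] k = 0 := by intro k _; simp [cnt]
    rw [List.map_congr_left h0]
    simp
  | cons c t ih =>
    have h1 : K.map (cnt (c :: t))
        = K.map (fun k => cnt t k + if kf c = k then (1 : Int) else 0) := by
      apply List.map_congr_left
      intro k _
      simp only [cnt, List.countP_cons]
      by_cases h : kf c = k <;> simp [h]
    have h2 : (K.map (fun k => cnt t k + if kf c = k then (1 : Int) else 0)).sum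
        = (K.map (cnt t)).sum + (K.map (fun k => if kf c = k then (1 : Int) else 0)).sum :=
      PySem.List.sum_map_add_int _ _ _
    rw [h1, h2, ih (fun x hx => hcov x (List.mem_cons_of_mem _ hx)),
        ind_sum K (kf c) hnd (hcov c List.mem_cons_self), List.length_cons]
    push_cast
    ring

-- B's run-length product over a sorted list is the product of the value counts
theorem runProd_char (n : Nat) : ∀ (s : List String), s.length ≤ n →
    s.Pairwise (· ≤ ·) →
    ∃ K : List String, K.Nodup ∧ (∀ x, x ∈ K ↔ x ∈ s) ∧
      runProd s = (K.map (cntS s)).prod := by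
  induction n with
  | zero =>
    intro s hlen _
    have hnil : s = [] := List.eq_nil_of_length_eq_zero (Nat.le_zero.mp hlen)
    subst hnil
    exact ⟨[], List.nodup_nil, by simp, by simp [runProd]⟩
  | succ m ih =>
    intro s hlen hsort
    cases s with
    | nil => exact ⟨[], List.nodup_nil, by simp, by simp [runProd]⟩
    | cons c rest =>
      rcases List.pairwise_cons.mp hsort with ⟨hc, hrest⟩
      set p := fun x : String => x == c with hp
      set t := rest.takeWhile p with ht
      set dr := rest.dropWhile p with hdr
      have hsplit : t ++ dr = rest := List.takeWhile_append_dropWhile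
      have htk : ∀ x ∈ t, x = c := by
        intro x hx
        have hbx := List.mem_takeWhile_imp hx
        rw [hp] at hbx
        exact eq_of_beq hbx
      have hdsub : dr.Sublist rest := List.dropWhile_sublist _
      have hdsort : dr.Pairwise (· ≤ ·) := hrest.sublist hdsub
      have hdlt : ∀ y ∈ dr, c < y := by
        cases hdre : dr with
        | nil => intro y hy; simp at hy
        | cons d0 dtl =>
          have hdw : rest.dropWhile p = d0 :: dtl := by rw [← hdr]; exact hdre
          have hd0mem : d0 ∈ rest := (hdre ▸ hdsub).subset List.mem_cons_self
          have hd0p : p d0 = false := by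
            have hh := List.head_dropWhile_not p (l := rest) (by simp [hdw])
            simp only [hdw, List.head_cons] at hh
            exact hh
          have hd0ne : d0 ≠ c := by
            intro h
            rw [hp] at hd0p
            simp [h] at hd0p
          have hd0lt : c < d0 := lt_of_le_of_ne (hc d0 hd0mem) (Ne.symm hd0ne)
          intro y hy
          rcases List.mem_cons.mp hy with rfl | hy'
          · exact hd0lt
          · exact lt_of_lt_of_le hd0lt ((List.pairwise_cons.mp (hdre ▸ hdsort)).1 y hy')
      have hdlen : dr.length ≤ m := by
        have h1 : dr.length ≤ rest.length := List.length_dropWhile_le _ _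
        have h2 : rest.length + 1 ≤ m + 1 := by simpa using hlen
        omega
      rcases ih dr hdlen hdsort with ⟨K', hK'nd, hK'mem, hK'prod⟩
      have hKcne : c ∉ K' := by
        intro hmem
        exact absurd rfl (ne_of_gt (hdlt c ((hK'mem _).mp hmem)))
      refine ⟨c :: K', List.nodup_cons.mpr ⟨hKcne, hK'nd⟩, ?_, ?_⟩
      · intro x
        constructor
        · intro hx
          rcases List.mem_cons.mp hx with rfl | hx'
          · exact List.mem_cons_self
          · exact List.mem_cons_of_mem _ (hdsub.subset ((hK'mem x).mp hx'))
        · intro hx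
          rcases List.mem_cons.mp hx with rfl | hy'
          · exact List.mem_cons_self
          · rw [← hsplit] at hy'
            rcases List.mem_append.mp hy' with hyt | hyd
            · rw [htk x hyt]; exact List.mem_cons_self
            · exact List.mem_cons_of_mem _ ((hK'mem _).mpr hyd)
      · -- the run-length product
        have hruneq : runProd (c :: rest) = ((t.length : Int) + 1) * runProd dr := by
          rw [runProd]
        have hcnat : (c :: rest).countP (fun x => x == c) = t.length + 1 := by
          have h1 : t.countP (fun x => x == c) = t.length :=
            List.countP_eq_length.mpr (fun x hx => by simp [htk x hx])
          have h2 : dr.countP (fun x => x == c) = 0 :=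
            List.countP_eq_zero.mpr (fun y hy => by simp [ne_of_gt (hdlt y hy)])
          rw [← hsplit]
          simp [List.countP_append, h1, h2]
        have hcntc : cntS (c :: rest) c = (t.length : Int) + 1 := by
          rw [cntS, hcnat]
          push_cast
          ring
        have hcongr : K'.map (cntS (c :: rest)) = K'.map (cntS dr) := by
          apply List.map_congr_left
          intro k hk
          have hkne : c ≠ k := ne_of_lt (hdlt k ((hK'mem k).mp hk))
          have h0 : ((fun x => x == k) c) = false := by simp [hkne]
          have h1 : t.countP (fun x => x == k) = 0 :=
            List.countP_eq_zero.mpr (fun x hx => by simp [htk x hx, hkne])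
          have h3 : (c :: rest).countP (fun x => x == k) = dr.countP (fun x => x == k) := by
            rw [← hsplit]
            simp [List.countP_append, h0, h1]
          simp [cntS, h3]
        rw [hruneq, hK'prod, List.map_cons, List.prod_cons, hcntc, hcongr]

-- ===== VERDICT (by name: the statement is the Claim_ definition above) =====
theorem solution_spec : Claim_equal_solution := by
  intro clothes _ _
  unfold Spec_solution
  show (((clothes.foldl (fun (d : PySem.Dict String (List String)) c =>
      let name := c.getD 0 ""
      let cate := c.getD 1 ""
      if d.contains cate then d.modify cate [] (· ++ [name])
      else d.insert cate [name]) PySem.Dict.empty).values.foldl (fun (ac : Int × Int) i =>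
      (ac.1 * PySem.List.len i, ac.2 + PySem.List.len i)) (1, 0)).1
    + ((clothes.foldl (fun (d : PySem.Dict String (List String)) c =>
      let name := c.getD 0 ""
      let cate := c.getD 1 ""
      if d.contains cate then d.modify cate [] (· ++ [name])
      else d.insert cate [name]) PySem.Dict.empty).values.foldl (fun (ac : Int × Int) i =>
      (ac.1 * PySem.List.len i, ac.2 + PySem.List.len i)) (1, 0)).2)
    = runProd (PySem.List.sorted (clothes.map (fun c => c.getD 1 "")) (fun x => x) false)
      + PySem.List.len (PySem.List.sorted (clothes.map (fun c => c.getD 1 "")) (fun x => x) false)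
  -- A side
  have hfold : clothes.foldl (fun (d : PySem.Dict String (List String)) c =>
      let name := c.getD 0 ""
      let cate := c.getD 1 ""
      if d.contains cate then d.modify cate [] (· ++ [name])
      else d.insert cate [name]) PySem.Dict.empty
      = clothes.foldl (fun (d : PySem.Dict String (List String)) c =>
          d.modify (kf c) [] (· ++ [c.getD 0 ""])) PySem.Dict.empty := by
    apply PySem.List.foldl_congr_mem
    intro d c _
    show (if d.contains (c.getD 1 "") then d.modify (c.getD 1 "") [] (· ++ [c.getD 0 ""])
      else d.insert (c.getD 1 "") [c.getD 0 ""]) = d.modify (kf c) [] (· ++ [c.getD 0 ""])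
    rcases Bool.eq_false_or_eq_true (d.contains (c.getD 1 "")) with h | h
    · rw [if_pos h]; rfl
    · rw [if_neg (by rw [h]; exact Bool.false_ne_true), kf, modify_not_contains _ _ _ h]
      simp
  rw [hfold]
  set dic := clothes.foldl (fun (d : PySem.Dict String (List String)) c =>
      d.modify (kf c) [] (· ++ [c.getD 0 ""])) PySem.Dict.empty with hdic
  have hkeysnd : dic.keys.Nodup :=
    PySem.Dict.nodup_keys_foldl_modify_key clothes kf []
      (fun _ c => (· ++ [c.getD 0 ""])) PySem.Dict.empty (by simp [PySem.Dict.keys_empty])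
  have hkeysmem : ∀ x, x ∈ dic.keys ↔ x ∈ clothes.map kf := by
    intro x
    rw [hdic, PySem.Dict.keys_foldl_modify_key clothes kf []
      (fun _ c => (· ++ [c.getD 0 ""])) PySem.Dict.empty]
    simp [PySem.Set.mem_update, PySem.Dict.keys_empty]
  have hgetD : ∀ k, dic.getD k []
      = (clothes.filter (fun c => kf c == k)).map (fun c => c.getD 0 "") := by
    intro k
    have h := PySem.Dict.getD_foldl_modify_append
      (clothes.map (fun c => (kf c, c.getD 0 ""))) PySem.Dict.empty k
    rw [List.foldl_map] at h
    simp only [PySem.Dict.getD_empty, List.nil_append, List.filter_map, List.map_map,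
      Function.comp_def] at h
    exact h
  have hvals : dic.values = dic.keys.map (fun k => dic.getD k []) :=
    PySem.Dict.values_eq_map_keys dic hkeysnd []
  rw [PySem.List.foldl_prod_mk (f := fun (ac : Int) i => ac * PySem.List.len i)
    (g := fun (ac : Int) i => ac + PySem.List.len i)]
  rw [hvals]
  simp only [foldl_mul_len, PySem.List.foldl_add, one_mul, zero_add, List.map_map]
  have hmapP : dic.keys.map ((fun i => ((i : List String).length : Int)) ∘ (fun k => dic.getD k []))
      = dic.keys.map (cnt clothes) := by
    apply List.map_congr_left
    intro k _
    simp only [Function.comp_def, hgetD k, cnt, List.length_map, List.countP_eq_length_filter]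
  have hmapS : dic.keys.map (PySem.List.len ∘ (fun k => dic.getD k []))
      = dic.keys.map (cnt clothes) := by
    rw [← hmapP]
    apply List.map_congr_left
    intro k _
    simp [PySem.List.len_eq]
  rw [hmapP, hmapS]
  -- B side
  set s := PySem.List.sorted (clothes.map (fun c => c.getD 1 "")) (fun x => x) false with hs
  have hperm : s.Perm (clothes.map kf) :=
    PySem.List.sorted_perm (clothes.map (fun c => c.getD 1 "")) (fun x => x) false
  have hsort : s.Pairwise (· ≤ ·) :=
    PySem.List.sorted_pairwise (clothes.map (fun c => c.getD 1 "")) (fun x => x)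
  rcases runProd_char s.length s (le_refl _) hsort with ⟨KB, hBnd, hBmem, hBprod⟩
  rw [hBprod]
  have hcnt : ∀ k, cntS s k = cnt clothes k := by
    intro k
    rw [cntS, cnt, hperm.countP_eq, List.countP_map]
    rfl
  have hmemB : ∀ x, x ∈ KB ↔ x ∈ clothes.map kf := by
    intro x
    rw [hBmem x]
    exact hperm.mem_iff
  have hpermK : dic.keys.Perm KB :=
    (List.perm_ext_iff_of_nodup hkeysnd hBnd).mpr
      (fun x => (hkeysmem x).trans (hmemB x).symm)
  have hprodeq : (dic.keys.map (cnt clothes)).prod = (KB.map (cntS s)).prod := by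
    have h1 : KB.map (cntS s) = KB.map (cnt clothes) :=
      List.map_congr_left (fun k _ => hcnt k)
    rw [h1]
    exact (hpermK.map (cnt clothes)).prod_eq
  have hsum : (dic.keys.map (cnt clothes)).sum = (clothes.length : Int) :=
    sum_cnt clothes dic.keys hkeysnd
      (fun c hc => (hkeysmem (kf c)).mpr (List.mem_map_of_mem hc))
  rw [hsum, hprodeq, PySem.List.len_eq, hperm.length_eq, List.length_map]
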